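-- pv_equiv track=rewrite | github.com/BuilderBenv1/brain-v | scripts/run_high_low_structure.py | truncate_to_tokens
-- ===== SOURCE A (Python) =====
-- def truncate_to_tokens(sentences, n_target):
--     out = []; total = 0
--     for s in sentences:
--         if total + len(s) <= n_target:
--             out.append(s); total += len(s)
--         else:
--             remaining = n_target - total
--             if remaining > 0: out.append(s[:remaining])
--             break
--     return out
-- ===== SOURCE B (Python) =====
-- def truncate_to_tokens(sentences, n_target):
--     # prefix-sum table + cut-point count + slicing, instead of A's accumulate-with-break loop
--     prefixes = []
--     total = 0
--     for s in sentences: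
--         total += len(s)
--         prefixes.append(total)
--     k = sum(1 for p in prefixes if p <= n_target)  # insertion point in a nondecreasing table
--     out = sentences[:k]
--     if k < len(sentences):
--         remaining = n_target - (prefixes[k - 1] if k > 0 else 0)
--         if remaining > 0:
--             out.append(sentences[k][:remaining])
--     return out
-- ===== Notes on version B (the rewrite author's own statement) =====
-- stated objective: alternative
-- what changed: A's single accumulate-with-early-break loop is replaced by a three-stage pipeline: build a prefix-sum table of sentence lengths, count how many prefixes fit the budget to get the cut index k, then return sentences[:k] plus the sliced cut sentence.
import Mathlib
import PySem

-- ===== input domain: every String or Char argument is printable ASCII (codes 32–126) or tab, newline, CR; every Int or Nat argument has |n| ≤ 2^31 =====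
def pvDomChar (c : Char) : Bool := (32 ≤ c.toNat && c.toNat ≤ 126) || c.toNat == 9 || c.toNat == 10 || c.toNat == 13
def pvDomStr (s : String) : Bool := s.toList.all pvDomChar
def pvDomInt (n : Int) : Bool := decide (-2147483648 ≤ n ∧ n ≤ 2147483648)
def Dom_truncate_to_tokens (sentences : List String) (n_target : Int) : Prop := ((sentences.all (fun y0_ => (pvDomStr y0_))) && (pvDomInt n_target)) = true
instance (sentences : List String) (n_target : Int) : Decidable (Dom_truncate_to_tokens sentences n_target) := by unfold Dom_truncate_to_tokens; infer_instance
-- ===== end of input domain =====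

-- B replaces A's accumulate-with-early-break loop by a prefix-sum table, a count of the
-- prefixes that fit (the cut point) and slicing; same cost, different decomposition.


-- ===== PORT A =====
-- the 'for s in sentences' loop with accumulator 'total' and early break
def tttLoop (n_target : Int) : List String → Int → List String
  | [], _ => []
  | s :: rest, total =>
    if total + PySem.Str.len s ≤ n_target then
      s :: tttLoop n_target rest (total + PySem.Str.len s)
    else
      if 0 < n_target - total then [PySem.Str.slice s none (some (n_target - total))] else []

def truncate_to_tokens (sentences : List String) (n_target : Int) : List String :=
  tttLoop n_target sentences 0

-- ===== PORT B =====
-- the prefix-sum loop ('total += len(s); prefixes.append(total)')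
def pvPrefixes : List String → Int → List Int
  | [], _ => []
  | s :: rest, total => (total + PySem.Str.len s) :: pvPrefixes rest (total + PySem.Str.len s)

def truncate_to_tokens_alt (sentences : List String) (n_target : Int) : List String :=
  let prefixes := pvPrefixes sentences 0
  -- sum(1 for p in prefixes if p <= n_target) is List.countP
  let k := prefixes.countP (fun p => decide (p ≤ n_target))
  let out := PySem.List.slice sentences none (some (k : Int))   -- sentences[:k]
  if k < sentences.length then
    let remaining := n_target - (if 0 < k then prefixes.getD (k - 1) 0 else 0)  -- prefixes[k-1] is in range (0 < k ≤ len)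
    if 0 < remaining then out ++ [PySem.Str.slice (sentences.getD k "") none (some remaining)]  -- sentences[k] is in range
    else out
  else out

-- ===== PRECONDITION & SPEC =====
def Spec_truncate_to_tokens (sentences : List String) (n_target : Int) (out : List String) : Prop := out = truncate_to_tokens_alt sentences n_target
instance (sentences : List String) (n_target : Int) (out : List String) : Decidable (Spec_truncate_to_tokens sentences n_target out) := by unfold Spec_truncate_to_tokens; infer_instance

-- ===== CLAIM (what is proved, stated in full; the proofs are below) =====
def Claim_equal_truncate_to_tokens : Prop := ∀ (sentences : List String) (n_target : Int), Dom_truncate_to_tokens sentences n_target → Spec_truncate_to_tokens sentences n_target (truncate_to_tokens sentences n_target)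

-- ===== LEMMAS AND PROOFS =====

theorem pvPrefixes_shift (ss : List String) (r t : Int) :
    pvPrefixes ss (r + t) = (pvPrefixes ss t).map (fun p => r + p) := by
  induction ss generalizing t with
  | nil => simp [pvPrefixes]
  | cons s rest ih =>
      simp only [pvPrefixes, List.map_cons]
      rw [show r + t + PySem.Str.len s = r + (t + PySem.Str.len s) by ring, ih]

theorem pvPrefixes_nonneg (ss : List String) (t : Int) :
    ∀ p ∈ pvPrefixes ss t, t ≤ p := by
  induction ss generalizing t with
  | nil => simp [pvPrefixes]
  | cons s rest ih =>
      intro p hp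
      simp only [pvPrefixes, List.mem_cons] at hp
      have hL : 0 ≤ PySem.Str.len s := by simp [PySem.Str.len_eq]
      rcases hp with h | h
      · omega
      · have := ih (t + PySem.Str.len s) p h; omega

theorem pvPrefixes_length (ss : List String) (t : Int) :
    (pvPrefixes ss t).length = ss.length := by
  induction ss generalizing t with
  | nil => rfl
  | cons s rest ih => simp [pvPrefixes, ih]

theorem tttLoop_shift (n : Int) (ss : List String) (total : Int) :
    tttLoop n ss total = tttLoop (n - total) ss 0 := by
  induction ss generalizing n total with
  | nil => rfl
  | cons s rest ih =>
      simp only [tttLoop]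
      have hc : (total + PySem.Str.len s ≤ n) ↔ (0 + PySem.Str.len s ≤ n - total) := by omega
      by_cases h : total + PySem.Str.len s ≤ n
      · rw [if_pos h, if_pos (hc.mp h), ih n (total + PySem.Str.len s),
            ih (n - total) (0 + PySem.Str.len s)]
        rw [show n - (total + PySem.Str.len s) = n - total - (0 + PySem.Str.len s) by ring]
      · rw [if_neg h, if_neg (fun hh => h (hc.mpr hh))]
        rw [show n - total - 0 = n - total by ring]

theorem alt_cons_fits (s : String) (rest : List String) (n : Int)
    (h : PySem.Str.len s ≤ n) :
    truncate_to_tokens_alt (s :: rest) n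
      = s :: truncate_to_tokens_alt rest (n - PySem.Str.len s) := by
  have hpref : pvPrefixes (s :: rest) 0
      = PySem.Str.len s :: (pvPrefixes rest 0).map (fun p => PySem.Str.len s + p) := by
    simp only [pvPrefixes, zero_add]
    rw [show PySem.Str.len s = PySem.Str.len s + 0 by ring, pvPrefixes_shift rest (PySem.Str.len s) 0]
    ring_nf
  set L := PySem.Str.len s with hL
  set P' := pvPrefixes rest 0 with hP'
  set k' := P'.countP (fun p => decide (p ≤ n - L)) with hk'
  have hcount : (pvPrefixes (s :: rest) 0).countP (fun p => decide (p ≤ n)) = k' + 1 := by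
    rw [hpref, List.countP_cons_of_pos (p := fun p => decide (p ≤ n)) (by simpa using h), List.countP_map]
    have hcq : ((fun p => decide (p ≤ n)) ∘ (fun p : Int => L + p))
        = (fun p : Int => decide (p ≤ n - L)) := by
      funext p; simp only [Function.comp_apply, decide_eq_decide]; omega
    rw [hcq]
  have hkle : k' ≤ P'.length := List.countP_le_length
  have hlen : P'.length = rest.length := pvPrefixes_length rest 0
  simp only [truncate_to_tokens_alt, hcount, ← hP', ← hk']
  simp only [hpref, PySem.List.slice_to_natCast, List.take_succ_cons, List.length_cons,
    Nat.add_lt_add_iff_right, List.getD_cons_succ, Nat.add_sub_cancel,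
    if_pos (Nat.succ_pos k')]
  have hmap : ∀ j : Nat, j < P'.length →
      (List.map (fun p => L + p) P').getD j 0 = L + P'.getD j 0 := by
    intro j hj
    rw [List.getD_eq_getElem _ _ (by simpa using hj), List.getD_eq_getElem _ _ hj,
      List.getElem_map]
  have hgetD : k' < rest.length →
      (L :: List.map (fun p => L + p) P').getD k' 0
        = L + (if 0 < k' then P'.getD (k' - 1) 0 else 0) := by
    intro hcase
    match hh : k' with
    | 0 => simp
    | j + 1 =>
        simp only [List.getD_cons_succ, if_pos (Nat.succ_pos j), Nat.add_sub_cancel]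
        rw [hmap j (by omega)]
  by_cases hcase : k' < rest.length
  · rw [if_pos hcase, if_pos hcase, hgetD hcase]
    rw [show n - (L + (if 0 < k' then P'.getD (k' - 1) 0 else 0))
        = n - L - (if 0 < k' then P'.getD (k' - 1) 0 else 0) by ring]
    split_ifs <;> simp [List.cons_append]
  · rw [if_neg hcase, if_neg hcase]

theorem alt_cons_nofits (s : String) (rest : List String) (n : Int)
    (h : ¬ PySem.Str.len s ≤ n) :
    truncate_to_tokens_alt (s :: rest) n
      = if 0 < n then [PySem.Str.slice s none (some n)] else [] := by
  have hk : (pvPrefixes (s :: rest) 0).countP (fun p => decide (p ≤ n)) = 0 := by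
    rw [List.countP_eq_zero]
    intro p hp
    have := pvPrefixes_nonneg (s :: rest) 0 p hp
    have hmem : p ∈ pvPrefixes (s :: rest) 0 := hp
    simp only [pvPrefixes] at hmem
    rcases List.mem_cons.mp hmem with h1 | h1
    · simp only [decide_eq_true_eq]; omega
    · have := pvPrefixes_nonneg rest (0 + PySem.Str.len s) p h1
      simp only [decide_eq_true_eq]; omega
  simp only [truncate_to_tokens_alt, hk]
  norm_num [PySem.List.slice]

theorem alt_eq_loop (ss : List String) (n : Int) :
    truncate_to_tokens_alt ss n = tttLoop n ss 0 := by
  induction ss generalizing n with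
  | nil => rfl
  | cons s rest ih =>
      simp only [tttLoop, zero_add]
      by_cases hfits : PySem.Str.len s ≤ n
      · rw [if_pos hfits, alt_cons_fits s rest n hfits, ih,
            tttLoop_shift n rest (PySem.Str.len s)]
      · rw [if_neg hfits, alt_cons_nofits s rest n hfits, sub_zero]

-- ===== VERDICT (by name: the statement is the Claim_ definition above) =====
theorem truncate_to_tokens_spec : Claim_equal_truncate_to_tokens := by
  intro sentences n_target _
  unfold Spec_truncate_to_tokens truncate_to_tokens
  rw [alt_eq_loop]
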